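-- pv_equiv track=rewrite | github.com/nacgarg/pic-encrypter | encrypter/Decrypt.py | unTuring
-- ===== SOURCE A (Python) =====
-- from copy import copy
--
-- def unTuring(d, itr, st, pl):
-- 	tp = copy(d)
-- 	for i in range(itr):
-- 		pl -= 1
-- 		if pl == -1:
-- 			pl = 6
-- 		if st == '1' and tp[pl] == '1':
-- 			st = '0'
-- 		elif st == '1' and tp[pl] == '0':
-- 			tp[pl] = '1'
-- 		elif st == '0' and tp[pl] == '1':
-- 			st = '1'
-- 			tp[pl] = '0'
-- 	return ''.join(tp)
-- ===== SOURCE B (Python) =====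
-- def _step(tp, st, pl):
--     pl -= 1
--     if pl == -1:
--         pl = 6
--     if st == '1' or st == '0':
--         c = tp[pl]
--         if st == '1':
--             if c == '1':
--                 st = '0'
--             elif c == '0':
--                 tp = list(tp)
--                 tp[pl] = '1'
--         else:
--             if c == '1':
--                 st = '1'
--                 tp = list(tp)
--                 tp[pl] = '0'
--     return tp, st, pl
--
-- def unTuring(d, itr, st, pl):
--     if st != '0' and st != '1':
--         return ''.join(d)  # no branch of the machine ever fires: the tape is returned unchanged
--     tp = list(d)
--     seen = {}
--     i = 0
--     while i < itr:
--         key = (tuple(tp), st, pl)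
--         if key in seen:
--             rem = (itr - i) % (i - seen[key])
--             for _ in range(rem):
--                 tp, st, pl = _step(tp, st, pl)
--             return ''.join(tp)
--         seen[key] = i
--         tp, st, pl = _step(tp, st, pl)
--         i += 1
--     return ''.join(tp)
-- ===== Notes on version B (the rewrite author's own statement) =====
-- stated objective: faster
-- what changed: A simulates every one of the itr machine steps; B records each (tape, state, pointer) configuration with its step index in a dict, detects the first repeated configuration, and fast-forwards the remaining steps with (itr - i) mod cycle-length, running only the remainder.
import Mathlib
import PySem

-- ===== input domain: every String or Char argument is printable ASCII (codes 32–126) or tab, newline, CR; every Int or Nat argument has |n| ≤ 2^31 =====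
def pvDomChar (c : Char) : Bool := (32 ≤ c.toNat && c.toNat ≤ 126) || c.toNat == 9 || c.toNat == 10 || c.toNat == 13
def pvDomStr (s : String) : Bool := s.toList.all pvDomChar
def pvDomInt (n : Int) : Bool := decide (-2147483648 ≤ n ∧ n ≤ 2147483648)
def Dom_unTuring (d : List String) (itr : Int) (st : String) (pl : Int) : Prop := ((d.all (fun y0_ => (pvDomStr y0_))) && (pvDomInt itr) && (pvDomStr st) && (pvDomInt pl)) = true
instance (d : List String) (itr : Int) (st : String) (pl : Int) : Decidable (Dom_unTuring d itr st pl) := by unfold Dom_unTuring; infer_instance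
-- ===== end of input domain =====

-- B replaces A's step-by-step simulation of all `itr` iterations by cycle detection over the
-- reachable (tape, state, pointer) configurations and fast-forwards `itr` with a modulus;
-- measurably faster for large `itr` (asymptotic).

-- ===== PORT A =====
-- literal transliteration of A: copy the tape, loop itr times, move the pointer
-- (wrapping -1 to 6), then the if/elif chain on st and tp[pl].
def unTuringLoopA (fuel : Nat) (tp : List String) (st : String) (pl : Int) :
    List String × String × Int :=
  match fuel with
  | 0 => (tp, st, pl)
  | k + 1 =>
    let pl1 := pl - 1
    let pl2 := if pl1 = -1 then (6 : Int) else pl1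
    if st = "1" ∧ PySem.List.pyGetD tp pl2 "" = "1" then
      unTuringLoopA k tp "0" pl2
    else if st = "1" ∧ PySem.List.pyGetD tp pl2 "" = "0" then
      unTuringLoopA k (PySem.List.pySetD tp pl2 "1") st pl2
    else if st = "0" ∧ PySem.List.pyGetD tp pl2 "" = "1" then
      unTuringLoopA k (PySem.List.pySetD tp pl2 "0") "1" pl2
    else
      unTuringLoopA k tp st pl2

def unTuring (d : List String) (itr : Int) (st : String) (pl : Int) : String :=
  PySem.Str.join "" (unTuringLoopA itr.toNat d st pl).1

-- ===== PORT B =====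
-- one machine step (B's helper _step)
def unTuringStep (c : List String × String × Int) : List String × String × Int :=
  let pl1 := c.2.2 - 1
  let pl2 := if pl1 = -1 then (6 : Int) else pl1
  let tp := c.1
  let st := c.2.1
  if st = "1" || st = "0" then
    let ch := PySem.List.pyGetD tp pl2 ""
    if st = "1" then
      if ch = "1" then (tp, "0", pl2)
      else if ch = "0" then (PySem.List.pySetD tp pl2 "1", st, pl2)
      else (tp, st, pl2)
    else
      if ch = "1" then (PySem.List.pySetD tp pl2 "0", "1", pl2)
      else (tp, st, pl2)
  else (tp, st, pl2)

-- B's trailing plain loop: run `rem` remaining steps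
def unTuringRun (n : Nat) (c : List String × String × Int) : List String × String × Int :=
  match n with
  | 0 => c
  | k + 1 => unTuringRun k (unTuringStep c)

-- B's main while-loop: record each configuration with its step index; on the first repeat,
-- fast-forward by (itr - i) mod cycle length and run only the remainder.
def unTuringLoopB (fuel : Nat) (itr i : Int)
    (seen : PySem.Dict (List String × String × Int) Int)
    (c : List String × String × Int) : List String × String × Int :=
  match fuel with
  | 0 => c
  | k + 1 =>
    match seen.get? c with
    | some j => unTuringRun (PySem.Int.mod (itr - i) (i - j)).toNat c
    | none => unTuringLoopB k itr (i + 1) (seen.insert c i) (unTuringStep c)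

def unTuring_alt (d : List String) (itr : Int) (st : String) (pl : Int) : String :=
  -- if st is neither '0' nor '1', no branch of the machine ever fires: the tape is unchanged
  if st ≠ "0" ∧ st ≠ "1" then PySem.Str.join "" d
  else PySem.Str.join "" (unTuringLoopB itr.toNat itr 0 PySem.Dict.empty (d, st, pl)).1

-- ===== PRECONDITION & SPEC =====
-- Pre_ excludes exactly the inputs on which A raises IndexError: when st is '0' or '1' the loop
-- reads tp[pl] every iteration, so every visited pointer value must be a valid Python index.
def Pre_unTuring (d : List String) (itr : Int) (st : String) (pl : Int) : Prop :=
  itr ≤ 0 ∨ (st ≠ "0" ∧ st ≠ "1") ∨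
  (pl < 0 ∧ itr ≤ d.length + pl) ∨
  (0 ≤ pl ∧ pl ≤ d.length ∧ (itr ≤ pl ∨ 7 ≤ d.length))
instance (d : List String) (itr : Int) (st : String) (pl : Int) : Decidable (Pre_unTuring d itr st pl) := by unfold Pre_unTuring; infer_instance

def pvWitness_unTuring : List String × Int × String × Int :=
  (["1", "0", "1", "1", "0", "1", "0"], 25, "1", 3)

def Spec_unTuring (d : List String) (itr : Int) (st : String) (pl : Int) (out : String) : Prop := out = unTuring_alt d itr st pl
instance (d : List String) (itr : Int) (st : String) (pl : Int) (out : String) : Decidable (Spec_unTuring d itr st pl out) := by unfold Spec_unTuring; infer_instance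

-- ===== CLAIM (what is proved, stated in full; the proofs are below) =====
def Claim_equal_unTuring : Prop := ∀ (d : List String) (itr : Int) (st : String) (pl : Int), Dom_unTuring d itr st pl → Pre_unTuring d itr st pl → Spec_unTuring d itr st pl (unTuring d itr st pl)

-- ===== LEMMAS AND PROOFS =====

-- A's loop body and B's _step take the same branch on every configuration.
theorem loopA_eq_run (k : Nat) (tp : List String) (st : String) (pl : Int) :
    unTuringLoopA k tp st pl = unTuringRun k (tp, st, pl) := by
  induction k generalizing tp st pl with
  | zero => rfl
  | succ k ih =>
    rw [unTuringLoopA, unTuringRun]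
    by_cases h1 : st = "1" <;> by_cases h0 : st = "0" <;>
      simp only [unTuringStep, h1, h0] <;>
      (try simp_all) <;> (try split_ifs) <;> simp_all

theorem run_eq_iterate (n : Nat) (c : List String × String × Int) :
    unTuringRun n c = unTuringStep^[n] c := by
  induction n generalizing c with
  | zero => rfl
  | succ k ih => rw [unTuringRun, ih, Function.iterate_succ_apply]

-- a configuration fixed by f^[p] is periodic: f^[m] c = f^[m % p] c
theorem iterate_mod_of_periodic (f : List String × String × Int → List String × String × Int)
    (c : List String × String × Int) (p : Nat) (hfix : f^[p] c = c) (m : Nat) :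
    f^[m] c = f^[m % p] c := by
  have hfix' : f^[p * (m / p)] c = c := by
    rw [Function.iterate_mul]; exact Function.iterate_fixed hfix (m / p)
  conv_lhs => rw [← Nat.mod_add_div m p]
  rw [Function.iterate_add_apply, hfix']

-- the invariant of B's while-loop: every recorded configuration reaches the current one
theorem loopB_eq_iterate (k : Nat) (itr i : Int)
    (seen : PySem.Dict (List String × String × Int) Int)
    (c : List String × String × Int)
    (hfuel : (itr - i).toNat = k)
    (hseen : ∀ key j, seen.get? key = some j → j < i ∧ unTuringStep^[(i - j).toNat] key = c) :
    unTuringLoopB k itr i seen c = unTuringStep^[k] c := by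
  induction k generalizing i seen c with
  | zero => rfl
  | succ k ih =>
    have hit : itr - i = (k : Int) + 1 := by omega
    cases hget : seen.get? c with
    | some j =>
      obtain ⟨hji, hfix⟩ := hseen c j hget
      have hp : 0 < (i - j).toNat := by omega
      have hij : (0 : Int) < i - j := by omega
      have hmod : (PySem.Int.mod (itr - i) (i - j)).toNat = (k + 1) % (i - j).toNat := by
        rw [PySem.Int.mod_eq_emod_of_pos hij]
        have e1 : itr - i = ((k + 1 : Nat) : Int) := by omega
        have e2 : i - j = (((i - j).toNat : Nat) : Int) := by omega
        rw [e1, e2, ← Int.natCast_mod]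
        simp only [Int.toNat_natCast]
      rw [unTuringLoopB]
      simp only [hget, hmod, run_eq_iterate]
      rw [← iterate_mod_of_periodic _ c _ hfix]
    | none =>
      rw [unTuringLoopB]
      simp only [hget]
      rw [ih (i + 1) _ (unTuringStep c) (by omega)]
      · rw [← Function.iterate_succ_apply]
      · intro key j hkey
        by_cases hkc : key = c
        · subst hkc
          rw [PySem.Dict.get?_insert_self] at hkey
          have hj : j = i := by injection hkey with h; exact h.symm
          refine ⟨by omega, ?_⟩
          have h1 : (i + 1 - j).toNat = 1 := by omega
          rw [h1]
          simp
        · rw [PySem.Dict.get?_insert_of_ne _ _ hkc] at hkey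
          obtain ⟨hji, hrest⟩ := hseen key j hkey
          refine ⟨by omega, ?_⟩
          have : (i + 1 - j).toNat = (i - j).toNat + 1 := by omega
          rw [this, Function.iterate_succ_apply', hrest]

-- with a state that is neither "0" nor "1" no branch fires: the tape component never changes
theorem iterate_fst_of_other_state (n : Nat) (tp : List String) (st : String) (pl : Int)
    (h0 : st ≠ "0") (h1 : st ≠ "1") : (unTuringStep^[n] (tp, st, pl)).1 = tp := by
  induction n generalizing tp pl with
  | zero => rfl
  | succ k ih =>
    rw [Function.iterate_succ_apply]
    have hstep : unTuringStep (tp, st, pl) =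
        (tp, st, if pl - 1 = -1 then (6 : Int) else pl - 1) := by
      simp [unTuringStep, h0, h1]
    rw [hstep, ih]

-- ===== VERDICT (by name: the statement is the Claim_ definition above) =====
theorem unTuring_spec : Claim_equal_unTuring := by
  intro d itr st pl _ _
  unfold Spec_unTuring unTuring unTuring_alt
  rw [loopA_eq_run, run_eq_iterate]
  by_cases hst : st ≠ "0" ∧ st ≠ "1"
  · rw [if_pos hst, iterate_fst_of_other_state _ _ _ _ hst.1 hst.2]
  · rw [if_neg hst,
      loopB_eq_iterate itr.toNat itr 0 PySem.Dict.empty (d, st, pl) (by omega)]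
    intro key j hkey
    rw [PySem.Dict.get?_empty] at hkey
    exact absurd hkey (by simp)
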